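-- pv_equiv track=rewrite | github.com/Algorithm-Study-AS/Algorithm-study | 김창성/구현/오리-12933.py | duck
-- ===== SOURCE A (Python) =====
-- def duck(room):
--     quack="quack"
--     visited=[0]*len(room)
--     count=0
--
--     for _ in range(len(room)):
--         found_quack=False #기존오리가 다시 우는 경우 체크
--         quack_index =0 #순서체크
--         visited_index=[] #길이 체크 ex)qqq,qua
--
--         for i in range(len(room)):
--             if visited[i]==0 and room[i] == quack[quack_index]:
--                 visited_index.append(i)
--
--                 if quack[quack_index]=='k':
--                     if found_quack==False:
--                         count+=1
--                         found_quack=True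
--
--                     for k in visited_index:
--                         visited[k]=1
--                         visited_index=[]
--
--                     quack_index=0
--                 else:
--                     quack_index+=1
--
--     if 0 in visited:
--         return -1
--     else:
--         return count
-- ===== SOURCE B (Python) =====
-- def duck(room):
--     # Single pass: count partial quacks waiting at each stage; a 'q' reuses a
--     # finished duck if one is idle, otherwise a new duck starts.
--     w1 = w2 = w3 = w4 = 0   # partials waiting for 'u','a','c','k'
--     free = 0                # finished ducks available for reuse
--     ducks = 0
--     ok = True
--     for ch in room:
--         if ch == 'q':
--             if free > 0:
--                 free -= 1
--             else:
--                 ducks += 1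
--             w1 += 1
--         elif ch == 'u':
--             if w1 > 0:
--                 w1 -= 1
--                 w2 += 1
--             else:
--                 ok = False
--         elif ch == 'a':
--             if w2 > 0:
--                 w2 -= 1
--                 w3 += 1
--             else:
--                 ok = False
--         elif ch == 'c':
--             if w3 > 0:
--                 w3 -= 1
--                 w4 += 1
--             else:
--                 ok = False
--         elif ch == 'k':
--             if w4 > 0:
--                 w4 -= 1
--                 free += 1
--             else:
--                 ok = False
--         else:
--             ok = False
--     if ok and w1 == 0 and w2 == 0 and w3 == 0 and w4 == 0:
--         return ducks
--     return -1
-- ===== Notes on version B (the rewrite author's own statement) =====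
-- stated objective: faster
-- what changed: Replaces the quadratic multi-pass scheme (one full rescan of the room per duck, with a visited array) by a single left-to-right pass that counts partial quacks waiting at each stage and reuses finished ducks, tracking the number of ducks started.
import Mathlib
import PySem

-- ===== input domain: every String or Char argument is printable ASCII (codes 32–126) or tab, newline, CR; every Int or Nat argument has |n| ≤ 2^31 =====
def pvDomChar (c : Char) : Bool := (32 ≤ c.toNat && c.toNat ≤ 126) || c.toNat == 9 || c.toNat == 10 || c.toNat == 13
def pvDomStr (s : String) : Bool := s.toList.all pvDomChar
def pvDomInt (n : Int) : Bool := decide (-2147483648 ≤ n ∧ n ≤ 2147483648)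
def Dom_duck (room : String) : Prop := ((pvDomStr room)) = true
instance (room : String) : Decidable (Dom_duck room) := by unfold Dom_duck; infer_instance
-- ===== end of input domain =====

set_option maxHeartbeats 1000000
set_option maxRecDepth 4000


-- B replaces A's quadratic repeated rescans (one pass per duck over a visited array)
-- by one linear pass counting partial quacks per stage; return values proved equal on all inputs.

-- ===== PORT A =====
-- quack[j] of Python's quack = "quack" (getD is exact: A only indexes with 0..4)
def qk (j : Nat) : Char := "quack".toList.getD j ' '

-- one step of A's inner scan: state (visited, count, found_quack, quack_index, visited_index),
-- input (i, room[i])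
def duckStep : (List Int × Int × Bool × Nat × List Nat) → (Nat × Char) →
    (List Int × Int × Bool × Nat × List Nat)
  | (v, cnt, found, qi, vidx), (i, c) =>
    if v.getD i 0 = 0 ∧ c = qk qi then
      let vidx' := vidx ++ [i]
      if qk qi = 'k' then
        (vidx'.foldl (fun w k => w.set k 1) v,
         (if found = false then cnt + 1 else cnt), true, 0, ([] : List Nat))
      else (v, cnt, found, qi + 1, vidx')
    else (v, cnt, found, qi, vidx)

def duck (room : String) : Int :=
  let rs := room.toList
  let n := rs.length
  -- outer loop `for _ in range(len(room))`, inner loop `for i in range(len(room))`;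
  -- room[i] is rs.getD i ' ' (always in range, exact)
  let res := (List.range n).foldl
    (fun (vc : List Int × Int) (_ : Nat) =>
      let r := (List.range n).foldl (fun st i => duckStep st (i, rs.getD i ' '))
        (vc.1, vc.2, false, 0, ([] : List Nat))
      (r.1, r.2.1))
    (List.replicate n (0 : Int), (0 : Int))
  if (0 : Int) ∈ res.1 then -1 else res.2

-- ===== PORT B =====
-- B's loop state: w1..w4 partial quacks waiting for 'u','a','c','k'; free finished ducks; ducks started; ok
structure BSt where
  w1 : Nat
  w2 : Nat
  w3 : Nat
  w4 : Nat
  free : Nat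
  ducks : Nat
  ok : Bool
deriving DecidableEq, Repr

def bStep (s : BSt) (c : Char) : BSt :=
  if c = 'q' then
    if s.free > 0 then { s with free := s.free - 1, w1 := s.w1 + 1 }
    else { s with ducks := s.ducks + 1, w1 := s.w1 + 1 }
  else if c = 'u' then
    if s.w1 > 0 then { s with w1 := s.w1 - 1, w2 := s.w2 + 1 } else { s with ok := false }
  else if c = 'a' then
    if s.w2 > 0 then { s with w2 := s.w2 - 1, w3 := s.w3 + 1 } else { s with ok := false }
  else if c = 'c' then
    if s.w3 > 0 then { s with w3 := s.w3 - 1, w4 := s.w4 + 1 } else { s with ok := false }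
  else if c = 'k' then
    if s.w4 > 0 then { s with w4 := s.w4 - 1, free := s.free + 1 } else { s with ok := false }
  else { s with ok := false }

def bInit : BSt := ⟨0, 0, 0, 0, 0, 0, true⟩

def duck_alt (room : String) : Int :=
  let s := room.toList.foldl bStep bInit
  if s.ok = true ∧ s.w1 = 0 ∧ s.w2 = 0 ∧ s.w3 = 0 ∧ s.w4 = 0 then (s.ducks : Int) else -1

-- ===== PRECONDITION & SPEC =====
def Spec_duck (room : String) (out : Int) : Prop := out = duck_alt room
instance (room : String) (out : Int) : Decidable (Spec_duck room out) := by unfold Spec_duck; infer_instance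

-- ===== CLAIM (what is proved, stated in full; the proofs are below) =====
def Claim_equal_duck : Prop := ∀ (room : String), Dom_duck room → Spec_duck room (duck room)

-- ===== LEMMAS AND PROOFS =====

-- ---- proof-side model of B's scan ----
def bRun (s : BSt) (t : List Char) : BSt := t.foldl bStep s

@[simp] lemma bRun_nil (s : BSt) : bRun s [] = s := rfl
@[simp] lemma bRun_cons (s : BSt) (c : Char) (t : List Char) :
    bRun s (c :: t) = bRun (bStep s c) t := rfl

-- final state is ok with no pending partials
def VFin (s : BSt) (t : List Char) : Prop :=
  (bRun s t).ok = true ∧ (bRun s t).w1 = 0 ∧ (bRun s t).w2 = 0 ∧ (bRun s t).w3 = 0 ∧ (bRun s t).w4 = 0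

-- ---- proof-side model of one of A's passes, on the list of unvisited chars ----
-- residual and completion flag of one greedy pass starting at pattern stage j
def passR : List Char → Nat → List Char × Bool
  | [], _ => ([], false)
  | c :: t, j =>
    if c = qk j then
      if j = 4 then ((passR t 0).1, true)
      else
        let p := passR t (j + 1)
        (if p.2 then p.1 else c :: p.1, p.2)
    else
      let p := passR t j
      (c :: p.1, p.2)

@[simp] lemma passR_nil (j : Nat) : passR [] j = ([], false) := rfl

@[simp] lemma qk_zero : qk 0 = 'q' := rfl
@[simp] lemma qk_one : qk 1 = 'u' := rfl
@[simp] lemma qk_two : qk 2 = 'a' := rfl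
@[simp] lemma qk_three : qk 3 = 'c' := rfl
@[simp] lemma qk_four : qk 4 = 'k' := rfl

lemma VFin_cons (s : BSt) (c : Char) (t : List Char) :
    VFin s (c :: t) ↔ VFin (bStep s c) t := Iff.rfl

lemma passR_not_found_id (t : List Char) (j : Nat) (h : (passR t j).2 = false) :
    (passR t j).1 = t := by
  induction t generalizing j with
  | nil => rfl
  | cons c t ih =>
    by_cases hc : c = qk j
    · by_cases hj : j = 4
      · simp [passR, hc, hj] at h
      · have h' : (passR t (j + 1)).2 = false := by simpa [passR, hc, hj] using h
        simp [passR, hc, hj, h', ih (j + 1) h']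
    · have h' : (passR t j).2 = false := by simpa [passR, hc] using h
      simp [passR, hc, ih j h']

-- (ok, w1..w4) of bRun depend only on (ok, w1..w4) of the start state
lemma bRun_okw (t : List Char) (s s' : BSt) (hok : s.ok = s'.ok) (h1 : s.w1 = s'.w1)
    (h2 : s.w2 = s'.w2) (h3 : s.w3 = s'.w3) (h4 : s.w4 = s'.w4) :
    (bRun s t).ok = (bRun s' t).ok ∧ (bRun s t).w1 = (bRun s' t).w1 ∧
    (bRun s t).w2 = (bRun s' t).w2 ∧ (bRun s t).w3 = (bRun s' t).w3 ∧
    (bRun s t).w4 = (bRun s' t).w4 := by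
  induction t generalizing s s' with
  | nil => exact ⟨hok, h1, h2, h3, h4⟩
  | cons c t ih =>
    have hstep : (bStep s c).ok = (bStep s' c).ok ∧ (bStep s c).w1 = (bStep s' c).w1 ∧
        (bStep s c).w2 = (bStep s' c).w2 ∧ (bStep s c).w3 = (bStep s' c).w3 ∧
        (bStep s c).w4 = (bStep s' c).w4 := by
      unfold bStep
      split_ifs <;> simp_all
    exact ih _ _ hstep.1 hstep.2.1 hstep.2.2.1 hstep.2.2.2.1 hstep.2.2.2.2

lemma VFin_congr (t : List Char) (s s' : BSt) (hok : s.ok = s'.ok) (h1 : s.w1 = s'.w1)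
    (h2 : s.w2 = s'.w2) (h3 : s.w3 = s'.w3) (h4 : s.w4 = s'.w4) :
    VFin s t ↔ VFin s' t := by
  obtain ⟨a, b, c, d, e⟩ := bRun_okw t s s' hok h1 h2 h3 h4
  unfold VFin
  rw [a, b, c, d, e]

def wAt (s : BSt) : Nat → Nat
  | 1 => s.w1
  | 2 => s.w2
  | 3 => s.w3
  | 4 => s.w4
  | _ => 0

-- a pending chain at stage j that never completes leaves a nonzero counter
lemma wAt_bStep_skip (s : BSt) (c : Char) (j : Nat) (hj1 : 1 ≤ j) (hj4 : j ≤ 4)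
    (hc : c ≠ qk j) : wAt s j ≤ wAt (bStep s c) j := by
  unfold bStep
  interval_cases j <;> split_ifs <;> simp_all [wAt]

lemma wAt_bStep_chain (s : BSt) (j : Nat) (hj1 : 1 ≤ j) (hj3 : j ≤ 3) (hw : 1 ≤ wAt s j) :
    1 ≤ wAt (bStep s (qk j)) (j + 1) := by
  interval_cases j <;>
    (simp only [wAt] at hw; unfold bStep; split_ifs <;> simp_all [wAt])

lemma stall (t : List Char) (j : Nat) (s : BSt) (hj1 : 1 ≤ j) (hj4 : j ≤ 4)
    (hb : (passR t j).2 = false) (hw : 1 ≤ wAt s j) : ¬ VFin s t := by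
  induction t generalizing j s with
  | nil =>
    intro hV
    obtain ⟨_, h1, h2, h3, h4⟩ := hV
    interval_cases j <;> simp [wAt] at hw <;> simp_all [bRun]
  | cons c t ih =>
    rw [VFin_cons]
    by_cases hc : c = qk j
    · by_cases hj : j = 4
      · exfalso; rw [hj] at hb hc; simp [passR, hc] at hb
      · have hb' : (passR t (j + 1)).2 = false := by simpa [passR, hc, hj] using hb
        refine ih (j + 1) (bStep s c) (by omega) (by omega) hb' ?_
        subst hc
        exact wAt_bStep_chain s j hj1 (by omega) hw
    · have hb' : (passR t j).2 = false := by simpa [passR, hc] using hb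
      refine ih j (bStep s c) hj1 hj4 hb' ?_
      have := wAt_bStep_skip s c j hj1 hj4 hc
      omega

-- state relations between the run on the residual (sr) and the run on the full list (st)
def RelP (j : Nat) (sr st : BSt) : Prop :=
  st.ok = sr.ok ∧ st.free = sr.free ∧ st.ducks = sr.ducks + 1 ∧
  st.w1 = sr.w1 + (if j = 1 then 1 else 0) ∧
  st.w2 = sr.w2 + (if j = 2 then 1 else 0) ∧
  st.w3 = sr.w3 + (if j = 3 then 1 else 0) ∧
  st.w4 = sr.w4 + (if j = 4 then 1 else 0)

def RelD (sr st : BSt) : Prop :=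
  st.ok = sr.ok ∧ st.free = sr.free + 1 ∧ st.ducks = sr.ducks + 1 ∧
  st.w1 = sr.w1 ∧ st.w2 = sr.w2 ∧ st.w3 = sr.w3 ∧ st.w4 = sr.w4

lemma bStep_q_okw (s : BSt) : (bStep s 'q').ok = s.ok ∧ (bStep s 'q').w1 = s.w1 + 1 ∧
    (bStep s 'q').w2 = s.w2 ∧ (bStep s 'q').w3 = s.w3 ∧ (bStep s 'q').w4 = s.w4 := by
  unfold bStep; split_ifs <;> simp_all

lemma bStep_q_pos (s : BSt) (h : s.free > 0) :
    bStep s 'q' = { s with free := s.free - 1, w1 := s.w1 + 1 } := by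
  unfold bStep; simp [h]

lemma bStep_q_zero (s : BSt) (h : ¬ s.free > 0) :
    bStep s 'q' = { s with ducks := s.ducks + 1, w1 := s.w1 + 1 } := by
  unfold bStep; simp [h]

lemma bStep_u_pos (s : BSt) (h : s.w1 > 0) :
    bStep s 'u' = { s with w1 := s.w1 - 1, w2 := s.w2 + 1 } := by
  unfold bStep; simp [h]

lemma bStep_a_pos (s : BSt) (h : s.w2 > 0) :
    bStep s 'a' = { s with w2 := s.w2 - 1, w3 := s.w3 + 1 } := by
  unfold bStep; simp [h]

lemma bStep_c_pos (s : BSt) (h : s.w3 > 0) :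
    bStep s 'c' = { s with w3 := s.w3 - 1, w4 := s.w4 + 1 } := by
  unfold bStep; simp [h]

lemma bStep_k_pos (s : BSt) (h : s.w4 > 0) :
    bStep s 'k' = { s with w4 := s.w4 - 1, free := s.free + 1 } := by
  unfold bStep; simp [h]

lemma RelD_step (c : Char) (sr st : BSt) (hc : c ≠ 'q') (h : RelD sr st) :
    RelD (bStep sr c) (bStep st c) := by
  obtain ⟨hok, hfree, hd, h1, h2, h3, h4⟩ := h
  unfold RelD bStep
  split_ifs <;> simp_all <;> omega

lemma RelP_step (j : Nat) (c : Char) (sr st : BSt) (hj1 : 1 ≤ j) (hj4 : j ≤ 4)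
    (hc : c ≠ qk j) (h : RelP j sr st) : RelP j (bStep sr c) (bStep st c) := by
  obtain ⟨hok, hfree, hd, h1, h2, h3, h4⟩ := h
  unfold RelP at *
  interval_cases j <;> simp_all <;> unfold bStep <;> split_ifs <;> simp_all <;> omega

-- main simulation: one chain of the pass, from stage j
lemma mainSim (t : List Char) (j : Nat) (sr st : BSt) (hj : j ≤ 4)
    (h0 : j = 0 → RelD sr st)
    (hp : 1 ≤ j → RelP j sr st ∧ (passR t j).2 = true) :
    (VFin sr (passR t j).1 ↔ VFin st t) ∧
    (VFin st t → (bRun sr (passR t j).1).ducks + 1 = (bRun st t).ducks) := by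
  induction t generalizing j sr st with
  | nil =>
    rcases Nat.eq_zero_or_pos j with hj0 | hj1
    · subst hj0
      obtain ⟨hok, hfree, hd, h1, h2, h3, h4⟩ := h0 rfl
      simp [passR_nil, VFin, bRun, hok, h1, h2, h3, h4, hd]
    · have := (hp hj1).2
      simp [passR_nil] at this
  | cons c t ih =>
    interval_cases j
    · -- j = 0 : between chains (one chain already completed)
      obtain ⟨hok, hfree, hd, h1, h2, h3, h4⟩ := h0 rfl
      by_cases hc : c = 'q'
      · subst hc
        by_cases hb : (passR t 1).2 = true
        · -- next chain starts and completes: 'q' is removed from the residual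
          have hfr : st.free > 0 := by omega
          have hstep := bStep_q_pos st hfr
          have hRel : RelP 1 sr (bStep st 'q') := by
            refine ⟨?_, ?_, ?_, ?_, ?_, ?_, ?_⟩ <;> simp [hstep] <;> omega
          have ihm := ih 1 sr (bStep st 'q') (by omega)
            (fun h => absurd h (by omega)) (fun _ => ⟨hRel, hb⟩)
          have hred : passR ('q' :: t) 0 = ((passR t 1).1, true) := by
            simp [passR, hb]
          rw [hred]
          rw [show VFin st ('q' :: t) ↔ VFin (bStep st 'q') t from Iff.rfl,
            show bRun st ('q' :: t) = bRun (bStep st 'q') t from rfl]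
          exact ihm
        · -- next chain stalls: nothing more is removed
          have hb' : (passR t 1).2 = false := by simpa using hb
          have hr : (passR t 1).1 = t := passR_not_found_id t 1 hb'
          have hred : passR ('q' :: t) 0 = ('q' :: t, false) := by
            simp [passR, hb', hr]
          have hw1 : 1 ≤ wAt (bStep st 'q') 1 := by
            have := (bStep_q_okw st).2.1; simp [wAt, this]
          have hns : ¬ VFin (bStep st 'q') t := stall t 1 _ (by omega) (by omega) hb' hw1
          have hcg : VFin (bStep sr 'q') t ↔ VFin (bStep st 'q') t := by
            obtain ⟨a1, a2, a3, a4, a5⟩ := bStep_q_okw sr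
            obtain ⟨b1, b2, b3, b4, b5⟩ := bStep_q_okw st
            exact VFin_congr t _ _ (by rw [a1, b1, hok]) (by omega) (by omega)
              (by omega) (by omega)
          rw [hred]
          constructor
          · rw [show VFin sr ('q' :: t) ↔ VFin (bStep sr 'q') t from Iff.rfl,
              show VFin st ('q' :: t) ↔ VFin (bStep st 'q') t from Iff.rfl]
            constructor
            · intro h; exact absurd (hcg.mp h) hns
            · intro h; exact absurd h hns
          · intro h
            exact absurd ((show VFin st ('q' :: t) ↔ VFin (bStep st 'q') t from Iff.rfl).mp h) hns
      · -- both sides process the skipped character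
        have hRel' : RelD (bStep sr c) (bStep st c) :=
          RelD_step c sr st hc ⟨hok, hfree, hd, h1, h2, h3, h4⟩
        have ihm := ih 0 (bStep sr c) (bStep st c) (by omega)
          (fun _ => hRel') (fun h => absurd h (by omega))
        have hred : passR (c :: t) 0 = (c :: (passR t 0).1, (passR t 0).2) := by
          simp [passR, hc]
        rw [hred]
        exact ⟨ihm.1, ihm.2⟩
    · -- j = 1
      obtain ⟨⟨hok, hfree, hd, h1, h2, h3, h4⟩, hb⟩ := hp (by omega)
      by_cases hc : c = 'u'
      · subst hc
        have hb' : (passR t 2).2 = true := by simpa [passR] using hb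
        have hwp : st.w1 > 0 := by simp at h1; omega
        have hstep := bStep_u_pos st hwp
        have hRel : RelP 2 sr (bStep st 'u') := by
          refine ⟨?_, ?_, ?_, ?_, ?_, ?_, ?_⟩ <;> simp [hstep] <;> simp_all <;> omega
        have ihm := ih 2 sr (bStep st 'u') (by omega)
          (fun h => absurd h (by omega)) (fun _ => ⟨hRel, hb'⟩)
        have hred : passR ('u' :: t) 1 = ((passR t 2).1, true) := by
          simp [passR, hb']
        rw [hred]
        exact ihm
      · have hb' : (passR t 1).2 = true := by simpa [passR, hc] using hb
        have hRel' : RelP 1 (bStep sr c) (bStep st c) :=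
          RelP_step 1 c sr st (by omega) (by omega) (by simpa using hc)
            ⟨hok, hfree, hd, h1, h2, h3, h4⟩
        have ihm := ih 1 (bStep sr c) (bStep st c) (by omega)
          (fun h => absurd h (by omega)) (fun _ => ⟨hRel', hb'⟩)
        have hred : passR (c :: t) 1 = (c :: (passR t 1).1, (passR t 1).2) := by
          simp [passR, hc]
        rw [hred]
        exact ⟨ihm.1, ihm.2⟩
    · -- j = 2
      obtain ⟨⟨hok, hfree, hd, h1, h2, h3, h4⟩, hb⟩ := hp (by omega)
      by_cases hc : c = 'a'
      · subst hc
        have hb' : (passR t 3).2 = true := by simpa [passR] using hb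
        have hwp : st.w2 > 0 := by simp at h2; omega
        have hstep := bStep_a_pos st hwp
        have hRel : RelP 3 sr (bStep st 'a') := by
          refine ⟨?_, ?_, ?_, ?_, ?_, ?_, ?_⟩ <;> simp [hstep] <;> simp_all <;> omega
        have ihm := ih 3 sr (bStep st 'a') (by omega)
          (fun h => absurd h (by omega)) (fun _ => ⟨hRel, hb'⟩)
        have hred : passR ('a' :: t) 2 = ((passR t 3).1, true) := by
          simp [passR, hb']
        rw [hred]
        exact ihm
      · have hb' : (passR t 2).2 = true := by simpa [passR, hc] using hb
        have hRel' : RelP 2 (bStep sr c) (bStep st c) :=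
          RelP_step 2 c sr st (by omega) (by omega) (by simpa using hc)
            ⟨hok, hfree, hd, h1, h2, h3, h4⟩
        have ihm := ih 2 (bStep sr c) (bStep st c) (by omega)
          (fun h => absurd h (by omega)) (fun _ => ⟨hRel', hb'⟩)
        have hred : passR (c :: t) 2 = (c :: (passR t 2).1, (passR t 2).2) := by
          simp [passR, hc]
        rw [hred]
        exact ⟨ihm.1, ihm.2⟩
    · -- j = 3
      obtain ⟨⟨hok, hfree, hd, h1, h2, h3, h4⟩, hb⟩ := hp (by omega)
      by_cases hc : c = 'c'
      · subst hc
        have hb' : (passR t 4).2 = true := by simpa [passR] using hb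
        have hwp : st.w3 > 0 := by simp at h3; omega
        have hstep := bStep_c_pos st hwp
        have hRel : RelP 4 sr (bStep st 'c') := by
          refine ⟨?_, ?_, ?_, ?_, ?_, ?_, ?_⟩ <;> simp [hstep] <;> simp_all <;> omega
        have ihm := ih 4 sr (bStep st 'c') (by omega)
          (fun h => absurd h (by omega)) (fun _ => ⟨hRel, hb'⟩)
        have hred : passR ('c' :: t) 3 = ((passR t 4).1, true) := by
          simp [passR, hb']
        rw [hred]
        exact ihm
      · have hb' : (passR t 3).2 = true := by simpa [passR, hc] using hb
        have hRel' : RelP 3 (bStep sr c) (bStep st c) :=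
          RelP_step 3 c sr st (by omega) (by omega) (by simpa using hc)
            ⟨hok, hfree, hd, h1, h2, h3, h4⟩
        have ihm := ih 3 (bStep sr c) (bStep st c) (by omega)
          (fun h => absurd h (by omega)) (fun _ => ⟨hRel', hb'⟩)
        have hred : passR (c :: t) 3 = (c :: (passR t 3).1, (passR t 3).2) := by
          simp [passR, hc]
        rw [hred]
        exact ⟨ihm.1, ihm.2⟩
    · -- j = 4 : the chain completes on a 'k'
      obtain ⟨⟨hok, hfree, hd, h1, h2, h3, h4⟩, hb⟩ := hp (by omega)
      by_cases hc : c = 'k'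
      · subst hc
        have hwp : st.w4 > 0 := by simp at h4; omega
        have hstep := bStep_k_pos st hwp
        have hRel : RelD sr (bStep st 'k') := by
          refine ⟨?_, ?_, ?_, ?_, ?_, ?_, ?_⟩ <;> simp [hstep] <;> simp_all <;> omega
        have ihm := ih 0 sr (bStep st 'k') (by omega)
          (fun _ => hRel) (fun h => absurd h (by omega))
        have hred : passR ('k' :: t) 4 = ((passR t 0).1, true) := by
          simp [passR]
        rw [hred]
        exact ihm
      · have hb' : (passR t 4).2 = true := by simpa [passR, hc] using hb
        have hRel' : RelP 4 (bStep sr c) (bStep st c) :=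
          RelP_step 4 c sr st (by omega) (by omega) (by simpa using hc)
            ⟨hok, hfree, hd, h1, h2, h3, h4⟩
        have ihm := ih 4 (bStep sr c) (bStep st c) (by omega)
          (fun h => absurd h (by omega)) (fun _ => ⟨hRel', hb'⟩)
        have hred : passR (c :: t) 4 = (c :: (passR t 4).1, (passR t 4).2) := by
          simp [passR, hc]
        rw [hred]
        exact ⟨ihm.1, ihm.2⟩

lemma bStep_ok_false (s : BSt) (c : Char) (h : s.ok = false) : (bStep s c).ok = false := by
  unfold bStep; split_ifs <;> simp_all

lemma ok_false_forever (t : List Char) (s : BSt) (h : s.ok = false) : (bRun s t).ok = false := by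
  induction t generalizing s with
  | nil => exact h
  | cons c t ih => exact ih (bStep s c) (bStep_ok_false s c h)

-- top of a pass: before the first chain has started
lemma topSim (t : List Char) (s : BSt) (hw1 : s.w1 = 0) (hw2 : s.w2 = 0) (hw3 : s.w3 = 0)
    (hw4 : s.w4 = 0) (hf : s.free = 0) :
    (VFin s (passR t 0).1 ↔ VFin s t) ∧
    (VFin s t → t = [] ∨ ((passR t 0).2 = true ∧
      (bRun s (passR t 0).1).ducks + 1 = (bRun s t).ducks)) := by
  induction t generalizing s with
  | nil => simp [passR_nil]
  | cons c t ih =>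
    by_cases hc : c = 'q'
    · subst hc
      have hfr : ¬ s.free > 0 := by omega
      have hstep := bStep_q_zero s hfr
      by_cases hb : (passR t 1).2 = true
      · have hRel : RelP 1 s (bStep s 'q') := by
          refine ⟨?_, ?_, ?_, ?_, ?_, ?_, ?_⟩ <;> simp [hstep] <;> omega
        have ihm := mainSim t 1 s (bStep s 'q') (by omega)
          (fun h => absurd h (by omega)) (fun _ => ⟨hRel, hb⟩)
        have hred : passR ('q' :: t) 0 = ((passR t 1).1, true) := by
          simp [passR, hb]
        rw [hred]
        refine ⟨ihm.1, fun h => Or.inr ⟨rfl, ihm.2 h⟩⟩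
      · have hb' : (passR t 1).2 = false := by simpa using hb
        have hr : (passR t 1).1 = t := passR_not_found_id t 1 hb'
        have hred : passR ('q' :: t) 0 = ('q' :: t, false) := by
          simp [passR, hb', hr]
        rw [hred]
        refine ⟨Iff.rfl, fun h => ?_⟩
        have hw1 : 1 ≤ wAt (bStep s 'q') 1 := by
          have := (bStep_q_okw s).2.1; simp [wAt, this]
        exact absurd h (stall t 1 (bStep s 'q') (by omega) (by omega) hb' hw1)
    · have hsp : (bStep s c).w1 = 0 ∧ (bStep s c).w2 = 0 ∧ (bStep s c).w3 = 0 ∧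
          (bStep s c).w4 = 0 ∧ (bStep s c).free = 0 ∧ (bStep s c).ok = false := by
        unfold bStep; split_ifs <;> simp_all
      have ihm := ih (bStep s c) hsp.1 hsp.2.1 hsp.2.2.1 hsp.2.2.2.1 hsp.2.2.2.2.1
      have hred : passR (c :: t) 0 = (c :: (passR t 0).1, (passR t 0).2) := by
        simp [passR, hc]
      rw [hred]
      refine ⟨ihm.1, fun h => ?_⟩
      exfalso
      have hof : (bRun (bStep s c) t).ok = false :=
        ok_false_forever t (bStep s c) hsp.2.2.2.2.2
      have h1 := h.1
      rw [bRun_cons] at h1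
      rw [hof] at h1
      exact Bool.false_ne_true h1

-- ---- iterated passes ----
def iterA : Nat → List Char → List Char × Nat
  | 0, t => (t, 0)
  | k + 1, t =>
    let q := iterA k t
    let p := passR q.1 0
    (p.1, q.2 + (if p.2 then 1 else 0))

lemma iterA_front (k : Nat) (t : List Char) :
    iterA (k + 1) t =
      (let p := passR t 0
       let q := iterA k p.1
       (q.1, q.2 + (if p.2 then 1 else 0))) := by
  induction k generalizing t with
  | zero => simp [iterA]
  | succ k ih =>
    show iterA (k + 1 + 1) t = _
    conv_lhs => rw [iterA]
    rw [ih t]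
    simp only [iterA]
    refine Prod.ext rfl ?_
    simp
    omega

lemma bStep_ducks (s : BSt) (c : Char) :
    s.ducks ≤ (bStep s c).ducks ∧ (bStep s c).ducks ≤ s.ducks + 1 := by
  unfold bStep; split_ifs <;> simp <;> omega

lemma ducks_le (t : List Char) (s : BSt) : (bRun s t).ducks ≤ s.ducks + t.length := by
  induction t generalizing s with
  | nil => simp
  | cons c t ih =>
    have h1 := (bStep_ducks s c).2
    have h2 := ih (bStep s c)
    simp only [bRun_cons, List.length_cons]
    omega

lemma ducks_mono (t : List Char) (s : BSt) : s.ducks ≤ (bRun s t).ducks := by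
  induction t generalizing s with
  | nil => simp
  | cons c t ih =>
    have h1 := (bStep_ducks s c).1
    have h2 := ih (bStep s c)
    simp only [bRun_cons]
    omega

lemma valid_ducks_zero_nil (t : List Char) (h : VFin bInit t)
    (hd : (bRun bInit t).ducks = 0) : t = [] := by
  cases t with
  | nil => rfl
  | cons c t =>
    exfalso
    by_cases hc : c = 'q'
    · subst hc
      have h1 : (bStep bInit 'q').ducks = 1 := by simp [bStep, bInit]
      have h2 := ducks_mono t (bStep bInit 'q')
      simp only [bRun_cons] at hd
      omega
    · have hko : (bStep bInit c).ok = false := by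
        unfold bStep; split_ifs <;> simp_all [bInit]
      have := ok_false_forever t (bStep bInit c) hko
      have h1 := h.1
      simp only [bRun_cons] at h1
      rw [this] at h1
      exact Bool.false_ne_true h1

lemma VFin_nil_bInit : VFin bInit [] := by
  refine ⟨rfl, rfl, rfl, rfl, rfl⟩

lemma iterV (k : Nat) (t : List Char) (h : VFin bInit t) (hk : (bRun bInit t).ducks ≤ k) :
    iterA k t = ([], (bRun bInit t).ducks) := by
  induction k generalizing t with
  | zero =>
    have ht := valid_ducks_zero_nil t h (by omega)
    subst ht
    simp [iterA, bRun, bInit]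
  | succ k ih =>
    rw [iterA_front]
    have hts := topSim t bInit rfl rfl rfl rfl rfl
    rcases hts.2 h with hnil | ⟨hb, hd⟩
    · subst hnil
      simp only [passR_nil]
      rw [ih [] VFin_nil_bInit (by simp [bRun, bInit])]
      simp [bRun, bInit]
    · have hvr : VFin bInit (passR t 0).1 := hts.1.mpr h
      have hle := ih (passR t 0).1 hvr (by omega)
      simp only [hle, hb]
      refine Prod.ext rfl ?_
      simp
      omega

lemma iterI (k : Nat) (t : List Char) (h : ¬ VFin bInit t) : ¬ VFin bInit (iterA k t).1 := by
  induction k with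
  | zero => exact h
  | succ k ih =>
    have hts := topSim (iterA k t).1 bInit rfl rfl rfl rfl rfl
    have : (iterA (k + 1) t).1 = (passR (iterA k t).1 0).1 := by simp [iterA]
    rw [this]
    exact fun hv => ih (hts.1.mp hv)

-- ---- refinement of A's indexed pass to passR ----
def residFrom (L : List (Nat × Char)) (v : List Int) : List Char :=
  L.filterMap (fun p => if v.getD p.1 0 = 0 then some p.2 else none)

def mark (v : List Int) (ks : List Nat) : List Int := ks.foldl (fun w k => w.set k 1) v

@[simp] lemma residFrom_nil (v : List Int) : residFrom [] v = [] := rfl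

lemma residFrom_cons (i : Nat) (c : Char) (L : List (Nat × Char)) (v : List Int) :
    residFrom ((i, c) :: L) v =
      if v.getD i 0 = 0 then c :: residFrom L v else residFrom L v := by
  unfold residFrom
  rw [List.filterMap_cons]
  by_cases h : v.getD i 0 = 0
  · rw [if_pos h, if_pos h]
  · rw [if_neg h, if_neg h]

lemma residFrom_congr (L : List (Nat × Char)) (v v' : List Int)
    (h : ∀ p ∈ L, v'.getD p.1 0 = v.getD p.1 0) : residFrom L v' = residFrom L v := by
  induction L with
  | nil => rfl
  | cons p L ih =>
    obtain ⟨i, c⟩ := p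
    rw [residFrom_cons, residFrom_cons, h (i, c) (by simp),
      ih (fun q hq => h q (by simp [hq]))]

@[simp] lemma mark_nil (v : List Int) : mark v [] = v := rfl

@[simp] lemma mark_cons (v : List Int) (k : Nat) (ks : List Nat) :
    mark v (k :: ks) = mark (v.set k 1) ks := rfl

lemma mark_length (ks : List Nat) (v : List Int) : (mark v ks).length = v.length := by
  induction ks generalizing v with
  | nil => rfl
  | cons k ks ih => simp [ih]

lemma getD_set (v : List Int) (j k : Nat) (x : Int) (hj : j < v.length) :
    (v.set j x).getD k 0 = if k = j then x else v.getD k 0 := by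
  by_cases h : k = j
  · subst h
    simp [List.getD_eq_getElem?_getD, hj]
  · simp [List.getD_eq_getElem?_getD, List.getElem?_set_ne (fun hh => h hh.symm), h]

lemma mark_getD (ks : List Nat) (v : List Int) (k : Nat)
    (hlen : ∀ j ∈ ks, j < v.length) :
    (mark v ks).getD k 0 = if k ∈ ks then 1 else v.getD k 0 := by
  induction ks generalizing v with
  | nil => simp
  | cons j ks ih =>
    rw [mark_cons, ih (v.set j 1)
      (fun a ha => by rw [List.length_set]; exact hlen a (by simp [ha]))]
    rw [getD_set v j k 1 (hlen j (by simp))]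
    by_cases h1 : k ∈ ks
    · simp [h1]
    · by_cases h2 : k = j <;> simp [h1, h2]

lemma qk_k_iff (qi : Nat) (h : qi ≤ 4) : qk qi = 'k' ↔ qi = 4 := by
  interval_cases qi <;> simp

lemma G1 (L : List (Nat × Char)) (v : List Int) (cnt : Int) (f : Bool) (qi : Nat)
    (vidx : List Nat) (hqi : qi ≤ 4)
    (hv0 : ∀ k ∈ vidx, v.getD k 0 = 0)
    (hvlt : ∀ k ∈ vidx, ∀ p ∈ L, k < p.1)
    (hvlen : ∀ k ∈ vidx, k < v.length)
    (hLlen : ∀ p ∈ L, p.1 < v.length)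
    (hpw : L.Pairwise (fun p q => p.1 < q.1)) :
    (L.foldl duckStep (v, cnt, f, qi, vidx)).2.1 =
      (if f then cnt else if (passR (residFrom L v) qi).2 then cnt + 1 else cnt) ∧
    residFrom L (L.foldl duckStep (v, cnt, f, qi, vidx)).1 = (passR (residFrom L v) qi).1 ∧
    (∀ k ∈ vidx, (L.foldl duckStep (v, cnt, f, qi, vidx)).1.getD k 0 =
      if (passR (residFrom L v) qi).2 then 1 else v.getD k 0) ∧
    (∀ k, k ∉ vidx → (∀ pr ∈ L, k ≠ pr.1) →
      (L.foldl duckStep (v, cnt, f, qi, vidx)).1.getD k 0 = v.getD k 0) ∧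
    (L.foldl duckStep (v, cnt, f, qi, vidx)).1.length = v.length := by
  induction L generalizing v cnt f qi vidx with
  | nil =>
    refine ⟨by simp, by simp, fun k hk => by simp, fun k _ _ => rfl, rfl⟩
  | cons pr L ih =>
    obtain ⟨i, c⟩ := pr
    have hiL : ∀ p ∈ L, i < p.1 := by
      intro p hp
      exact List.rel_of_pairwise_cons hpw hp
    by_cases hvis : v.getD i 0 = 0
    · by_cases hc : c = qk qi
      · by_cases hk : qk qi = 'k'
        · -- completion of the chain: mark everything, restart
          have hqi4 : qi = 4 := (qk_k_iff qi hqi).mp hk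
          subst hqi4
          have hstep : duckStep (v, cnt, f, 4, vidx) (i, c) =
              (mark v (vidx ++ [i]), (if f = false then cnt + 1 else cnt), true, 0,
                ([] : List Nat)) := by
            simp only [duckStep]
            rw [if_pos ⟨hvis, hc⟩, if_pos qk_four]
            rfl
          have hmarklen : ∀ j ∈ vidx ++ [i], j < v.length := by
            intro j hj
            rcases List.mem_append.mp hj with hj | hj
            · exact hvlen j hj
            · simp at hj; rw [hj]; exact hLlen (i, c) (by simp)
          have hm2len : (mark v (vidx ++ [i])).length = v.length := mark_length _ v
          have hresL' : residFrom L (mark v (vidx ++ [i])) = residFrom L v := by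
            refine residFrom_congr L v _ (fun p hp => ?_)
            rw [mark_getD _ v p.1 hmarklen]
            have : p.1 ∉ vidx ++ [i] := by
              intro hmem
              rcases List.mem_append.mp hmem with hmem | hmem
              · exact absurd (hvlt _ hmem p (by simp [hp])) (by omega)
              · simp at hmem
                exact absurd (hiL p hp) (by omega)
            simp [this]
          have ihm := ih (mark v (vidx ++ [i])) (if f = false then cnt + 1 else cnt) true 0 []
            (by omega) (by simp) (by simp) (by simp)
            (fun p hp => by rw [hm2len]; exact hLlen p (by simp [hp]))
            (List.Pairwise.of_cons hpw)
          rw [hresL'] at ihm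
          obtain ⟨ihc, ihr, _, ihu, ihl⟩ := ihm
          have hfold : ((i, c) :: L).foldl duckStep (v, cnt, f, 4, vidx) =
              L.foldl duckStep (mark v (vidx ++ [i]), (if f = false then cnt + 1 else cnt),
                true, 0, ([] : List Nat)) := by
            rw [List.foldl_cons, hstep]
          have hres : residFrom ((i, c) :: L) v = c :: residFrom L v := by
            rw [residFrom_cons, if_pos hvis]
          have hpass : passR (c :: residFrom L v) 4 = ((passR (residFrom L v) 0).1, true) := by
            have hck : c = 'k' := by rw [hc]; rfl
            subst hck
            simp [passR]
          have hiNot : ∀ pr ∈ L, i ≠ pr.1 := fun pr hp => by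
            have := hiL pr hp; omega
          have hgi : (L.foldl duckStep (mark v (vidx ++ [i]),
              (if f = false then cnt + 1 else cnt), true, 0, ([] : List Nat))).1.getD i 0
              = 1 := by
            rw [ihu i (by simp) hiNot, mark_getD _ v i hmarklen]
            simp
          rw [hfold, hres, hpass]
          refine ⟨?_, ?_, ?_, ?_, ?_⟩
          · rw [ihc]; cases f <;> simp
          · rw [residFrom_cons, hgi]
            simp [ihr]
          · intro k hk
            have hkni : k ∉ ([] : List Nat) := by simp
            have hknL : ∀ pr ∈ L, k ≠ pr.1 := fun pr hp => by
              have h1 := hvlt k hk (i, c) (by simp)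
              have h2 := hiL pr hp
              simp at h1
              omega
            rw [ihu k hkni hknL, mark_getD _ v k hmarklen]
            simp [List.mem_append.mpr (Or.inl hk)]
          · intro k hkv hkL
            have hknL : ∀ pr ∈ L, k ≠ pr.1 := fun pr hp => hkL pr (by simp [hp])
            rw [ihu k (by simp) hknL, mark_getD _ v k hmarklen]
            have : k ∉ vidx ++ [i] := by
              intro hmem
              rcases List.mem_append.mp hmem with hmem | hmem
              · exact hkv hmem
              · simp at hmem
                exact hkL (i, c) (by simp) hmem
            simp [this]
          · rw [ihl, hm2len]
        · -- the chain advances one stage and keeps scanning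
          have hqi4 : qi ≠ 4 := fun h => hk (by rw [h]; rfl)
          have hqi3 : qi ≤ 3 := by omega
          have hstep : duckStep (v, cnt, f, qi, vidx) (i, c) =
              (v, cnt, f, qi + 1, vidx ++ [i]) := by
            simp only [duckStep]
            rw [if_pos ⟨hvis, hc⟩, if_neg hk]
          have ihm := ih v cnt f (qi + 1) (vidx ++ [i]) (by omega)
            (by
              intro k hk2
              rcases List.mem_append.mp hk2 with h | h
              · exact hv0 k h
              · simp at h; rw [h]; exact hvis)
            (by
              intro k hk2 p hp
              rcases List.mem_append.mp hk2 with h | h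
              · exact hvlt k h p (by simp [hp])
              · simp at h; rw [h]; exact hiL p hp)
            (by
              intro k hk2
              rcases List.mem_append.mp hk2 with h | h
              · exact hvlen k h
              · simp at h; rw [h]; exact hLlen (i, c) (by simp))
            (fun p hp => hLlen p (by simp [hp]))
            (List.Pairwise.of_cons hpw)
          obtain ⟨ihc, ihr, ihm3, ihu, ihl⟩ := ihm
          have hfold : ((i, c) :: L).foldl duckStep (v, cnt, f, qi, vidx) =
              L.foldl duckStep (v, cnt, f, qi + 1, vidx ++ [i]) := by
            rw [List.foldl_cons, hstep]
          have hres : residFrom ((i, c) :: L) v = c :: residFrom L v := by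
            rw [residFrom_cons, if_pos hvis]
          have hpass : passR (c :: residFrom L v) qi =
              (if (passR (residFrom L v) (qi + 1)).2 then (passR (residFrom L v) (qi + 1)).1
               else c :: (passR (residFrom L v) (qi + 1)).1,
               (passR (residFrom L v) (qi + 1)).2) := by
            simp only [passR]
            rw [if_pos hc, if_neg hqi4]
          have hgi : (L.foldl duckStep (v, cnt, f, qi + 1, vidx ++ [i])).1.getD i 0 =
              if (passR (residFrom L v) (qi + 1)).2 then 1 else v.getD i 0 :=
            ihm3 i (by simp)
          rw [hfold, hres, hpass]
          refine ⟨ihc, ?_, ?_, ?_, ihl⟩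
          · rw [residFrom_cons, hgi]
            by_cases hb : (passR (residFrom L v) (qi + 1)).2 = true
            · simp [hb, ihr]
            · simp only [Bool.not_eq_true] at hb
              have hvis' : v[i]?.getD 0 = 0 := by
                simpa [List.getD_eq_getElem?_getD] using hvis
              simp [hb, hvis', ihr]
          · intro k hk
            rw [ihm3 k (List.mem_append.mpr (Or.inl hk))]
          · intro k hkv hkL
            have : k ∉ vidx ++ [i] := by
              intro hmem
              rcases List.mem_append.mp hmem with hmem | hmem
              · exact hkv hmem
              · simp at hmem
                exact hkL (i, c) (by simp) hmem
            exact ihu k this (fun pr hp => hkL pr (by simp [hp]))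
      · -- the character does not match the expected stage: it is skipped
        have hstep : duckStep (v, cnt, f, qi, vidx) (i, c) = (v, cnt, f, qi, vidx) := by
          simp only [duckStep]
          rw [if_neg (fun h => hc h.2)]
        have hiNotV : i ∉ vidx := fun hmem => by
          have := hvlt i hmem (i, c) (by simp); simp at this
        have ihm := ih v cnt f qi vidx hqi hv0
          (fun k hk2 p hp => hvlt k hk2 p (by simp [hp]))
          hvlen (fun p hp => hLlen p (by simp [hp])) (List.Pairwise.of_cons hpw)
        obtain ⟨ihc, ihr, ihm3, ihu, ihl⟩ := ihm
        have hfold : ((i, c) :: L).foldl duckStep (v, cnt, f, qi, vidx) =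
            L.foldl duckStep (v, cnt, f, qi, vidx) := by
          rw [List.foldl_cons, hstep]
        have hres : residFrom ((i, c) :: L) v = c :: residFrom L v := by
          rw [residFrom_cons, if_pos hvis]
        have hpass : passR (c :: residFrom L v) qi =
            (c :: (passR (residFrom L v) qi).1, (passR (residFrom L v) qi).2) := by
          simp only [passR]
          rw [if_neg hc]
        have hgi : (L.foldl duckStep (v, cnt, f, qi, vidx)).1.getD i 0 = v.getD i 0 :=
          ihu i hiNotV (fun pr hp => by have := hiL pr hp; omega)
        rw [hfold, hres, hpass]
        refine ⟨ihc, ?_, ihm3, ?_, ihl⟩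
        · rw [residFrom_cons, hgi, if_pos hvis, ihr]
        · intro k hkv hkL
          exact ihu k hkv (fun pr hp => hkL pr (by simp [hp]))
    · -- position already visited: skipped, and absent from the residual
      have hstep : duckStep (v, cnt, f, qi, vidx) (i, c) = (v, cnt, f, qi, vidx) := by
        simp only [duckStep]
        rw [if_neg (fun h => hvis h.1)]
      have hiNotV : i ∉ vidx := fun hmem => hvis (hv0 i hmem)
      have ihm := ih v cnt f qi vidx hqi hv0
        (fun k hk2 p hp => hvlt k hk2 p (by simp [hp]))
        hvlen (fun p hp => hLlen p (by simp [hp])) (List.Pairwise.of_cons hpw)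
      obtain ⟨ihc, ihr, ihm3, ihu, ihl⟩ := ihm
      have hfold : ((i, c) :: L).foldl duckStep (v, cnt, f, qi, vidx) =
          L.foldl duckStep (v, cnt, f, qi, vidx) := by
        rw [List.foldl_cons, hstep]
      have hres : residFrom ((i, c) :: L) v = residFrom L v := by
        rw [residFrom_cons, if_neg hvis]
      have hgi : (L.foldl duckStep (v, cnt, f, qi, vidx)).1.getD i 0 = v.getD i 0 :=
        ihu i hiNotV (fun pr hp => by have := hiL pr hp; omega)
      rw [hfold, hres]
      refine ⟨ihc, ?_, ihm3, ?_, ihl⟩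
      · rw [residFrom_cons, hgi, if_neg hvis, ihr]
      · intro k hkv hkL
        exact ihu k hkv (fun pr hp => hkL pr (by simp [hp]))

-- ---- assembling the whole program ----
def LL (rs : List Char) : List (Nat × Char) :=
  (List.range rs.length).map (fun i => (i, rs.getD i ' '))

lemma LL_pairwise (rs : List Char) : (LL rs).Pairwise (fun p q => p.1 < q.1) := by
  unfold LL
  rw [List.pairwise_map]
  exact List.pairwise_lt_range

lemma LL_mem (rs : List Char) (p : Nat × Char) (hp : p ∈ LL rs) : p.1 < rs.length := by
  unfold LL at hp
  obtain ⟨i, hi, rfl⟩ := List.mem_map.mp hp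
  simpa using List.mem_range.mp hi

lemma getD_replicate_zero (n k : Nat) : (List.replicate n (0 : Int)).getD k 0 = 0 := by
  simp [List.getD_eq_getElem?_getD, List.getElem?_replicate]
  split <;> rfl

lemma residFrom_all_zero (L : List (Nat × Char)) (v : List Int)
    (h : ∀ p ∈ L, v.getD p.1 0 = 0) : residFrom L v = L.map (·.2) := by
  induction L with
  | nil => rfl
  | cons p L ih =>
    obtain ⟨i, c⟩ := p
    rw [residFrom_cons, if_pos (h (i, c) (by simp)), List.map_cons,
      ih (fun q hq => h q (by simp [hq]))]

lemma map_snd_LL (rs : List Char) : (LL rs).map (·.2) = rs := by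
  unfold LL
  rw [List.map_map]
  apply List.ext_getElem
  · simp
  · intro i h1 h2
    simp [List.getD_eq_getElem?_getD, List.getElem?_eq_getElem, h2]

lemma resid_init (rs : List Char) :
    residFrom (LL rs) (List.replicate rs.length (0 : Int)) = rs := by
  rw [residFrom_all_zero _ _ (fun p _ => getD_replicate_zero _ _), map_snd_LL]

lemma inner_eq (rs : List Char) (s : List Int × Int × Bool × Nat × List Nat) :
    (List.range rs.length).foldl (fun st i => duckStep st (i, rs.getD i ' ')) s =
      (LL rs).foldl duckStep s := by
  unfold LL
  rw [List.foldl_map]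

lemma mem_zero_iff (rs : List Char) (v : List Int) (hlen : v.length = rs.length) :
    ((0 : Int) ∈ v) ↔ residFrom (LL rs) v ≠ [] := by
  constructor
  · intro h
    obtain ⟨k, hk, hv⟩ := List.getElem_of_mem h
    have hkr : k < rs.length := by omega
    have hmem : (k, rs.getD k ' ') ∈ LL rs := by
      unfold LL
      exact List.mem_map.mpr ⟨k, List.mem_range.mpr hkr, rfl⟩
    have hg : v[k]?.getD 0 = 0 := by
      simp [List.getElem?_eq_getElem, hk, hv]
    have : rs.getD k ' ' ∈ residFrom (LL rs) v := by
      unfold residFrom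
      exact List.mem_filterMap.mpr
        ⟨(k, rs.getD k ' '), hmem, by simp [List.getD_eq_getElem?_getD, hg]⟩
    exact List.ne_nil_of_mem this
  · intro h
    obtain ⟨c, hc⟩ := List.exists_mem_of_ne_nil _ h
    obtain ⟨p, hp, hpc⟩ := List.mem_filterMap.mp hc
    have hg : v.getD p.1 0 = 0 := by
      by_contra hng
      rw [if_neg hng] at hpc
      simp at hpc
    have hplen : p.1 < v.length := by rw [hlen]; exact LL_mem rs p hp
    have : v[p.1] = 0 := by
      simpa [List.getD_eq_getElem?_getD, List.getElem?_eq_getElem, hplen] using hg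
    exact this ▸ List.getElem_mem hplen

lemma outer_inv (rs : List Char) (m : Nat) :
    ((List.range m).foldl
        (fun (vc : List Int × Int) (_ : Nat) =>
          let r := (List.range rs.length).foldl (fun st i => duckStep st (i, rs.getD i ' '))
            (vc.1, vc.2, false, 0, ([] : List Nat))
          (r.1, r.2.1))
        (List.replicate rs.length (0 : Int), (0 : Int))).1.length = rs.length ∧
    residFrom (LL rs)
      ((List.range m).foldl
        (fun (vc : List Int × Int) (_ : Nat) =>
          let r := (List.range rs.length).foldl (fun st i => duckStep st (i, rs.getD i ' '))
            (vc.1, vc.2, false, 0, ([] : List Nat))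
          (r.1, r.2.1))
        (List.replicate rs.length (0 : Int), (0 : Int))).1 = (iterA m rs).1 ∧
    ((List.range m).foldl
        (fun (vc : List Int × Int) (_ : Nat) =>
          let r := (List.range rs.length).foldl (fun st i => duckStep st (i, rs.getD i ' '))
            (vc.1, vc.2, false, 0, ([] : List Nat))
          (r.1, r.2.1))
        (List.replicate rs.length (0 : Int), (0 : Int))).2 = ((iterA m rs).2 : Int) := by
  induction m with
  | zero =>
    refine ⟨by simp, by simpa using resid_init rs, by simp [iterA]⟩
  | succ m ih =>
    obtain ⟨ih1, ih2, ih3⟩ := ih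
    rw [List.range_succ, List.foldl_append]
    set o := (List.range m).foldl
        (fun (vc : List Int × Int) (_ : Nat) =>
          let r := (List.range rs.length).foldl (fun st i => duckStep st (i, rs.getD i ' '))
            (vc.1, vc.2, false, 0, ([] : List Nat))
          (r.1, r.2.1))
        (List.replicate rs.length (0 : Int), (0 : Int)) with ho
    simp only [List.foldl_cons, List.foldl_nil]
    rw [inner_eq rs (o.1, o.2, false, 0, [])]
    obtain ⟨g1, g2, _, _, g5⟩ := G1 (LL rs) o.1 o.2 false 0 [] (by omega)
      (by simp) (by simp) (by simp)
      (fun p hp => by rw [ih1]; exact LL_mem rs p hp)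
      (LL_pairwise rs)
    rw [ih2] at g1 g2
    refine ⟨by rw [g5, ih1], by rw [g2]; simp [iterA], ?_⟩
    rw [g1, ih3]
    simp only [iterA]
    by_cases hb : (passR (iterA m rs).1 0).2 = true <;> simp [hb]

-- ===== VERDICT (by name: the statement is the Claim_ definition above) =====
theorem duck_spec : Claim_equal_duck := by
  unfold Claim_equal_duck Spec_duck
  intro room _
  unfold duck duck_alt
  simp only []
  set t := room.toList with ht
  obtain ⟨hlen, hres, hcnt⟩ := outer_inv t t.length
  by_cases hV : VFin bInit t
  · have hdle : (bRun bInit t).ducks ≤ t.length := by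
      have := ducks_le t bInit
      simpa [bInit] using this
    have hit := iterV t.length t hV hdle
    rw [hit] at hres hcnt
    have hnotmem : ¬ ((0 : Int) ∈ (((List.range t.length).foldl
        (fun (vc : List Int × Int) (_ : Nat) =>
          let r := (List.range t.length).foldl (fun st i => duckStep st (i, t.getD i ' '))
            (vc.1, vc.2, false, 0, ([] : List Nat))
          (r.1, r.2.1))
        (List.replicate t.length (0 : Int), (0 : Int))).1)) := by
      rw [mem_zero_iff t _ hlen, hres]
      simp
    rw [if_neg hnotmem, hcnt]
    obtain ⟨v1, v2, v3, v4, v5⟩ := hV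
    rw [if_pos ⟨v1, v2, v3, v4, v5⟩]
    rfl
  · have hi := iterI t.length t hV
    have hne : (iterA t.length t).1 ≠ [] := by
      intro h
      rw [h] at hi
      exact hi VFin_nil_bInit
    have hmem : ((0 : Int) ∈ (((List.range t.length).foldl
        (fun (vc : List Int × Int) (_ : Nat) =>
          let r := (List.range t.length).foldl (fun st i => duckStep st (i, t.getD i ' '))
            (vc.1, vc.2, false, 0, ([] : List Nat))
          (r.1, r.2.1))
        (List.replicate t.length (0 : Int), (0 : Int))).1)) := by
      rw [mem_zero_iff t _ hlen, hres]
      exact hne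
    rw [if_pos hmem]
    have hnc : ¬ ((List.foldl bStep bInit t).ok = true ∧ (List.foldl bStep bInit t).w1 = 0 ∧
        (List.foldl bStep bInit t).w2 = 0 ∧ (List.foldl bStep bInit t).w3 = 0 ∧
        (List.foldl bStep bInit t).w4 = 0) := hV
    rw [if_neg hnc]
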